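-- pv_equiv track=rewrite | github.com/star14ms/CUBE_simulation | Cube_class.py | _split_cmd
-- ===== SOURCE A (Python) =====
-- def _split_cmd(cmds):
--     splited_cmds = []
--     cmd_start = None
--     for idx, cmd in enumerate(cmds):
--         if cmd in ['U','E','D','R','M','L','F','S','B','x','y','z','u','d','r','l','f','b']:
--             if cmd_start == None:
--                 cmd_start = idx
--             else:
--                 splited_cmds.append(cmds[cmd_start:idx])
--                 cmd_start = idx
--         elif cmd != ' ':
--             return [cmd, '?']
--
--     splited_cmds.append(cmds[cmd_start:])
--
--     return splited_cmds
-- ===== SOURCE B (Python) =====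
-- def _split_cmd(cmds):
--     moves = set('UEDRMLFSBxyzudrlfb')
--     # pass 1: validation only
--     for ch in cmds:
--         if ch != ' ' and ch not in moves:
--             return [ch, '?']
--     # pass 2: build tokens back-to-front, no indices or slices:
--     # scan right-to-left buffering chars; each move char flushes a token.
--     tokens = []
--     buf = []  # chars of the current token, in reverse order
--     for ch in reversed(cmds):
--         buf.append(ch)
--         if ch in moves:
--             tokens.append(''.join(reversed(buf)))
--             buf = []
--     tokens.reverse()
--     return tokens if tokens else [cmds]
-- ===== Notes on version B (the rewrite author's own statement) =====
-- stated objective: alternative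
-- what changed: B first validates the whole string in a separate pass, then builds tokens back-to-front with a right-to-left scan that accumulates characters into a buffer flushed at each move character (no indices or slicing), instead of A's left-to-right scan that tracks a mutable start index and slices tokens out inline.
import Mathlib
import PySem

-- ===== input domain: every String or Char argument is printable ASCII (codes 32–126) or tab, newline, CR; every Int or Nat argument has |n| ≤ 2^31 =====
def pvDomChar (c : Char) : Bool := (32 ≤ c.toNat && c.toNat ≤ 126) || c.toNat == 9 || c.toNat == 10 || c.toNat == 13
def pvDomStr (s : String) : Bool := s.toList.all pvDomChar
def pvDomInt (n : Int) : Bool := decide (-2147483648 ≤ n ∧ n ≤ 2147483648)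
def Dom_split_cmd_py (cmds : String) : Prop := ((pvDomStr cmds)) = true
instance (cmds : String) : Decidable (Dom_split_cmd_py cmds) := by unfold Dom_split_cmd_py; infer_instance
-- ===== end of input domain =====

-- B validates the whole string in a separate first pass, then builds tokens back-to-front with a
-- right-to-left fold flushing a character buffer at each move char, instead of A's left-to-right
-- index-slicing scan; objective: alternative decomposition (return value only; neither mutates).


-- ===== PORT A =====
def pvMoves : List Char := ['U','E','D','R','M','L','F','S','B','x','y','z','u','d','r','l','f','b']

-- the loop of A: state = (splited_cmds, cmd_start); early return on an invalid char.
-- cmds[cmd_start:idx] with 0 ≤ cmd_start ≤ idx ≤ len is exactly (drop cmd_start).take (idx - cmd_start);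
-- cmds[cmd_start:] with cmd_start = None is the whole string.
def splitALoop (cmds : List Char) : List Char → Nat → List (List Char) → Option Nat → List (List Char)
  | [], _, acc, st =>
      acc ++ [match st with | none => cmds | some s => cmds.drop s]
  | c :: rs, idx, acc, st =>
      if c ∈ pvMoves then
        match st with
        | none => splitALoop cmds rs (idx + 1) acc (some idx)
        | some s => splitALoop cmds rs (idx + 1) (acc ++ [(cmds.drop s).take (idx - s)]) (some idx)
      else if c = ' ' then
        splitALoop cmds rs (idx + 1) acc st
      else
        [[c], ['?']]

def split_cmd_py (cmds : String) : List String :=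
  (splitALoop cmds.toList cmds.toList 0 [] none).map String.ofList

-- ===== PORT B =====
-- the move-character set of Source B: set('UEDRMLFSBxyzudrlfb')
def pvMovesB : PySem.Set Char := PySem.Set.ofList "UEDRMLFSBxyzudrlfb".toList

-- Source B pass 1: return the first character that is neither ' ' nor a move char
def firstInvalid : List Char → Option Char
  | [] => none
  | c :: rs => if c ≠ ' ' ∧ c ∉ pvMovesB then some c else firstInvalid rs

-- Source B pass 2: loop over reversed(cmds); state = (tokens-in-reverse, buf-in-reverse);
-- each move char flushes ''.join(reversed(buf)) as a token; tokens reversed at the end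
def collectLoop : List Char → List (List Char) × List Char → List (List Char) × List Char
  | [], st => st
  | c :: rs, st =>
      let buf' := st.2 ++ [c]
      if c ∈ pvMovesB then collectLoop rs (st.1 ++ [buf'.reverse], [])
      else collectLoop rs (st.1, buf')

def split_cmd_py_alt (cmds : String) : List String :=
  match firstInvalid cmds.toList with
  | some c => [String.ofList [c], "?"]
  | none =>
      match (collectLoop cmds.toList.reverse ([], [])).1.reverse with
      | [] => [cmds]
      | toks => toks.map String.ofList

-- ===== PRECONDITION & SPEC =====
def Spec_split_cmd_py (cmds : String) (out : List String) : Prop := out = split_cmd_py_alt cmds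
instance (cmds : String) (out : List String) : Decidable (Spec_split_cmd_py cmds out) := by unfold Spec_split_cmd_py; infer_instance

-- ===== CLAIM (what is proved, stated in full; the proofs are below) =====
def Claim_equal_split_cmd_py : Prop := ∀ (cmds : String), Dom_split_cmd_py cmds → Spec_split_cmd_py cmds (split_cmd_py cmds)

-- ===== LEMMAS AND PROOFS =====

-- a forward (right-recursion) view of B's pass 2, used only by the proofs
def collectRev : List Char → List (List Char) × List Char
  | [] => ([], [])
  | c :: rs =>
      let p := collectRev rs
      let buf' := c :: p.2
      if c ∈ pvMovesB then (buf' :: p.1, []) else (p.1, buf')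

lemma collectLoop_append (xs ys : List Char) (st : List (List Char) × List Char) :
    collectLoop (xs ++ ys) st = collectLoop ys (collectLoop xs st) := by
  induction xs generalizing st with
  | nil => rfl
  | cons d ds ih =>
    simp only [List.cons_append, collectLoop]
    split_ifs <;> exact ih _

lemma collectLoop_reverse (l : List Char) :
    collectLoop l.reverse ([], []) = ((collectRev l).1.reverse, (collectRev l).2.reverse) := by
  induction l with
  | nil => rfl
  | cons c rs ih =>
    rw [List.reverse_cons, collectLoop_append, ih]
    show collectLoop [c] _ = _
    simp only [collectLoop, collectRev]
    split_ifs <;> simp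

lemma movesB_eq : pvMovesB = pvMoves := by decide

lemma memB_iff (c : Char) : c ∈ pvMovesB ↔ c ∈ pvMoves := by rw [movesB_eq]

-- A's loop in the some-state, seen as a left-recursion over the pending token
def tokA : List Char → List Char → List (List Char)
  | pend, [] => [pend]
  | pend, c :: rs => if c ∈ pvMoves then pend :: tokA [c] rs else tokA (pend ++ [c]) rs

lemma splitALoop_invalid (cmds rest : List Char) (idx : Nat) (acc : List (List Char))
    (st : Option Nat) (c : Char) (h : firstInvalid rest = some c) :
    splitALoop cmds rest idx acc st = [[c], ['?']] := by
  induction rest generalizing idx acc st with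
  | nil => simp [firstInvalid] at h
  | cons d rs ih =>
    simp only [firstInvalid] at h
    simp only [splitALoop]
    by_cases hm : d ∈ pvMoves
    · rw [if_pos hm, if_neg (by simp [(memB_iff d).2 hm])] at *
      cases st <;> exact ih _ _ _ h
    · rw [if_neg hm]
      by_cases hsp : d = ' '
      · rw [if_pos hsp, if_neg (by simp [hsp])] at *
        exact ih _ _ _ h
      · rw [if_neg hsp, if_pos ⟨hsp, fun hc => hm ((memB_iff d).1 hc)⟩] at *
        cases h; rfl

lemma splitALoop_some (cmds rest : List Char) (idx s : Nat) (acc : List (List Char))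
    (pend : List Char)
    (hv : firstInvalid rest = none) (hdrop : cmds.drop s = pend ++ rest)
    (hlen : pend.length = idx - s) (hs : s ≤ idx) :
    splitALoop cmds rest idx acc (some s) = acc ++ tokA pend rest := by
  induction rest generalizing idx s acc pend with
  | nil =>
    simp only [splitALoop, tokA]
    rw [hdrop, List.append_nil]
  | cons c rs ih =>
    simp only [firstInvalid] at hv
    have htake : (cmds.drop s).take (idx - s) = pend := by
      rw [hdrop, ← hlen, List.take_left]
    have hdropidx : cmds.drop idx = c :: rs := by
      have h1 : cmds.drop idx = List.drop (idx - s) (cmds.drop s) := by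
        rw [List.drop_drop]; congr 1; omega
      rw [h1, hdrop, ← hlen, List.drop_left]
    simp only [splitALoop, tokA]
    by_cases hm : c ∈ pvMoves
    · rw [if_pos hm, if_pos hm]
      rw [ih (idx + 1) idx (acc ++ [(cmds.drop s).take (idx - s)]) [c]
        (by rw [if_neg (by simp [(memB_iff c).2 hm])] at hv; exact hv)
        (by simpa using hdropidx) (by simp) (by omega)]
      rw [htake]; simp
    · rw [if_neg hm, if_neg hm]
      by_cases hsp : c = ' '
      · rw [if_pos hsp]
        rw [ih (idx + 1) s acc (pend ++ [c])
          (by rw [if_neg (by simp [hsp])] at hv; exact hv)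
          (by rw [hdrop]; simp) (by simp; omega) (by omega)]
      · rw [if_pos ⟨hsp, fun hc => hm ((memB_iff c).1 hc)⟩] at hv
        cases hv

-- connecting A's left-recursion tokA with B's right-to-left fold collectRev
lemma tokA_collectRev (rest pend : List Char) :
    tokA pend rest = (pend ++ (collectRev rest).2) :: (collectRev rest).1 := by
  induction rest generalizing pend with
  | nil => simp [tokA, collectRev]
  | cons c rs ih =>
    simp only [tokA, collectRev]
    by_cases h : c ∈ pvMoves
    · rw [if_pos h, if_pos ((memB_iff c).2 h), ih [c]]
      simp
    · rw [if_neg h, if_neg (fun hc => h ((memB_iff c).1 hc)), ih (pend ++ [c])]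
      simp

lemma splitALoop_none (cmds rest : List Char) (idx : Nat) (acc : List (List Char))
    (hv : firstInvalid rest = none) (hdrop : cmds.drop idx = rest) :
    splitALoop cmds rest idx acc none =
      acc ++ (match collectRev rest with
              | ([], _) => [cmds]
              | (toks, _) => toks) := by
  induction rest generalizing idx acc with
  | nil => simp [splitALoop, collectRev]
  | cons c rs ih =>
    simp only [firstInvalid] at hv
    have hdrs : cmds.drop (idx + 1) = rs := by
      have h1 : cmds.drop (idx + 1) = List.drop 1 (cmds.drop idx) := by
        rw [List.drop_drop, Nat.add_comm]
      rw [h1, hdrop]; rfl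
    simp only [splitALoop]
    by_cases hm : c ∈ pvMoves
    · have hvB : firstInvalid rs = none := by
        rw [if_neg (by simp [(memB_iff c).2 hm])] at hv; exact hv
      rw [if_pos hm]
      rw [splitALoop_some cmds rs (idx + 1) idx acc [c] hvB (by simpa using hdrop)
        (by simp) (by omega)]
      rw [tokA_collectRev rs [c]]
      simp only [collectRev, if_pos ((memB_iff c).2 hm)]
      simp
    · rw [if_neg hm]
      by_cases hsp : c = ' '
      · have hvB : firstInvalid rs = none := by
          rw [if_neg (by simp [hsp])] at hv; exact hv
        rw [if_pos hsp, ih (idx + 1) acc hvB hdrs]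
        simp only [collectRev, if_neg (fun hc => hm ((memB_iff c).1 hc))]
        cases hcr : collectRev rs with
        | mk toks buf => cases toks <;> simp
      · rw [if_pos ⟨hsp, fun hc => hm ((memB_iff c).1 hc)⟩] at hv
        cases hv

-- ===== VERDICT (by name: the statement is the Claim_ definition above) =====
theorem split_cmd_py_spec : Claim_equal_split_cmd_py := by
  intro cmds _
  unfold Spec_split_cmd_py split_cmd_py split_cmd_py_alt
  cases h : firstInvalid cmds.toList with
  | some c =>
    rw [splitALoop_invalid cmds.toList cmds.toList 0 [] none c h]
    rfl
  | none =>
    rw [splitALoop_none cmds.toList cmds.toList 0 [] h (by simp)]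
    rw [collectLoop_reverse]
    simp only [List.reverse_reverse]
    cases hc : collectRev cmds.toList with
    | mk toks buf =>
      cases toks with
      | nil => simp
      | cons t ts => simp
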